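-- pv_equiv track=rewrite | github.com/bitkaio/migratowl | migratowl/registry.py | _extract_pypi_url
-- ===== SOURCE A (Python) =====
-- def _extract_pypi_url(project_urls: dict[str, str] | None, keys: list[str]) -> str | None:
--     """Extract first matching URL from PyPI project_urls."""
--     if not project_urls:
--         return None
--     for key in keys:
--         for k, v in project_urls.items():
--             if k.lower() == key.lower():
--                 return v
--     return None
-- ===== SOURCE B (Python) =====
-- def _extract_pypi_url(project_urls: dict[str, str] | None, keys: list[str]) -> str | None:
--     """Extract first matching URL from PyPI project_urls."""
--     if not project_urls:
--         return None
--     rank = {}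
--     for i, key in enumerate(keys):
--         lk = key.lower()
--         if lk not in rank:
--             rank[lk] = i
--     best_rank = len(keys)
--     best = None
--     for k, v in project_urls.items():
--         r = rank.get(k.lower())
--         if r is not None and r < best_rank:
--             best_rank = r
--             best = v
--     return best
-- ===== Notes on version B (the rewrite author's own statement) =====
-- stated objective: alternative
-- what changed: B inverts the traversal: it precomputes each distinct lowercased key's priority rank, then makes a single argmin pass over project_urls.items() keeping the item whose key has the lowest rank (earliest item on ties), instead of A's keys-outer loop that rescans all items for every key.
import Mathlib
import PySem

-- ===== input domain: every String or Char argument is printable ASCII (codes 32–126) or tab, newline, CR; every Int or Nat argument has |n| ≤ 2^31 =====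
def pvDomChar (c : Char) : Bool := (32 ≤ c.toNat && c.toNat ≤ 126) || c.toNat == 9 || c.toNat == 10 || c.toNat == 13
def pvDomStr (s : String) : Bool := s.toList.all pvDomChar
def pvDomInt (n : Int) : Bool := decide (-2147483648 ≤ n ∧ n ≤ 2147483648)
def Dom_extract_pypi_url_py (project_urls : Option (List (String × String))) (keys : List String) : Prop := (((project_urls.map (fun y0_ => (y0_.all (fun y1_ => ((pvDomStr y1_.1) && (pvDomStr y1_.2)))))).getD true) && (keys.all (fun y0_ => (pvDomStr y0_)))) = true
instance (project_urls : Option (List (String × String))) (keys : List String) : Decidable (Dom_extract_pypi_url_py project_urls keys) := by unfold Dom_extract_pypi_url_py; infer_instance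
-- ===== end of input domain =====

-- B inverts the traversal: instead of A's keys-outer nested rescans, B precomputes each key's
-- priority rank and makes ONE pass over the items keeping the item with the best (lowest) rank.

-- ===== PORT A =====
-- inner 'for k, v in project_urls.items(): if k.lower() == key.lower(): return v'
def pvInnerA (key : String) : List (String × String) → Option String
  | [] => none
  | (k, v) :: t =>
      if PySem.Str.lower k == PySem.Str.lower key then some v else pvInnerA key t

-- outer 'for key in keys:'
def pvOuterA (items : List (String × String)) : List String → Option String
  | [] => none
  | key :: rest =>
      match pvInnerA key items with
      | some v => some v
      | none => pvOuterA items rest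

def extract_pypi_url_py (project_urls : Option (List (String × String))) (keys : List String) : Option String :=
  match project_urls with
  | none => none
  | some items => if items = [] then none else pvOuterA items keys

-- ===== PORT B =====
-- 'for i, key in enumerate(keys): lk = key.lower(); if lk not in rank: rank[lk] = i'
def pvBuildRank (i : Nat) (d : PySem.Dict String Nat) : List String → PySem.Dict String Nat
  | [] => d
  | key :: rest =>
      let lk := PySem.Str.lower key
      pvBuildRank (i + 1) (if d.contains lk then d else d.insert lk i) rest

-- 'for k, v in project_urls.items(): r = rank.get(k.lower()); if r is not None and r < best_rank: …'
def pvScanB (rank : PySem.Dict String Nat) (bestRank : Nat) (best : Option String) :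
    List (String × String) → Option String
  | [] => best
  | (k, v) :: t =>
      match rank.get? (PySem.Str.lower k) with
      | some r => if r < bestRank then pvScanB rank r (some v) t else pvScanB rank bestRank best t
      | none => pvScanB rank bestRank best t

def extract_pypi_url_py_alt (project_urls : Option (List (String × String))) (keys : List String) : Option String :=
  match project_urls with
  | none => none
  | some items =>
      if items = [] then none
      else pvScanB (pvBuildRank 0 PySem.Dict.empty keys) keys.length none items

-- ===== PRECONDITION & SPEC =====
def Spec_extract_pypi_url_py (project_urls : Option (List (String × String))) (keys : List String) (out : Option String) : Prop := out = extract_pypi_url_py_alt project_urls keys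
instance (project_urls : Option (List (String × String))) (keys : List String) (out : Option String) : Decidable (Spec_extract_pypi_url_py project_urls keys out) := by unfold Spec_extract_pypi_url_py; infer_instance

-- ===== CLAIM (what is proved, stated in full; the proofs are below) =====
def Claim_equal_extract_pypi_url_py : Prop := ∀ (project_urls : Option (List (String × String))) (keys : List String), Dom_extract_pypi_url_py project_urls keys → Spec_extract_pypi_url_py project_urls keys (extract_pypi_url_py project_urls keys)

-- ===== LEMMAS AND PROOFS =====

-- first-occurrence index (relative) of a lowercased key among keys
def pvF : List String → String → Option Nat
  | [], _ => none
  | key :: rest, s =>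
      if PySem.Str.lower key = s then some 0 else (pvF rest s).map (· + 1)

-- the rank dict realises pvF (with offset i, over an initial dict d)
theorem pvBuildRank_get (keys : List String) (i : Nat) (d : PySem.Dict String Nat) (s : String) :
    (pvBuildRank i d keys).get? s =
      (match d.get? s with
       | some r => some r
       | none => (pvF keys s).map (· + i)) := by
  induction keys generalizing i d with
  | nil => rcases h : d.get? s with _ | r <;> simp [pvBuildRank, pvF, h]
  | cons key rest ih =>
    simp only [pvBuildRank, pvF, ih]
    by_cases hc : d.contains (PySem.Str.lower key) = true
    · simp only [hc, if_true]
      rcases h : d.get? s with _ | r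
      · by_cases he : PySem.Str.lower key = s
        · exact absurd ((PySem.Dict.get?_eq_none_iff_contains d s).mp h)
            (by rw [← he]; simp [hc])
        · rcases pvF rest s with _ | r <;> (simp [he]; try omega)
      · rfl
    · simp only [hc, if_false, Bool.false_eq_true]
      by_cases he : PySem.Str.lower key = s
      · have hn : d.get? s = none := by
          rw [← he]
          exact (PySem.Dict.get?_eq_none_iff_contains d _).mpr (by simpa using hc)
        rw [← he, PySem.Dict.get?_insert_self, he, hn]
        simp
      · rw [PySem.Dict.get?_insert_of_ne d i (fun h => he h.symm)]
        rcases d.get? s with _ | r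
        · rcases pvF rest s with _ | r
          · simp [he]
          · simp [he]; omega
        · simp

-- the scan, expressed directly through pvF instead of the dict
def pvScanF (keys : List String) (bestRank : Nat) (best : Option String) :
    List (String × String) → Option String
  | [] => best
  | (k, v) :: t =>
      match pvF keys (PySem.Str.lower k) with
      | some r => if r < bestRank then pvScanF keys r (some v) t else pvScanF keys bestRank best t
      | none => pvScanF keys bestRank best t

theorem pvScanB_eq_pvScanF (keys : List String) (items : List (String × String))
    (br : Nat) (best : Option String) :
    pvScanB (pvBuildRank 0 PySem.Dict.empty keys) br best items = pvScanF keys br best items := by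
  induction items generalizing br best with
  | nil => rfl
  | cons p t ih =>
    obtain ⟨k, v⟩ := p
    simp only [pvScanB, pvScanF, pvBuildRank_get]
    have h0 : (PySem.Dict.empty : PySem.Dict String Nat).get? (PySem.Str.lower k) = none := rfl
    rw [h0]
    rcases pvF keys (PySem.Str.lower k) with _ | r
    · exact ih br best
    · simp only [Option.map_some, Nat.add_zero]
      split_ifs <;> exact ih _ _

-- once bestRank = 0 the scan never updates
theorem pvScanF_zero (keys : List String) (items : List (String × String)) (best : Option String) :
    pvScanF keys 0 best items = best := by
  induction items generalizing best with
  | nil => rfl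
  | cons p t ih =>
    obtain ⟨k, v⟩ := p
    simp only [pvScanF]
    rcases pvF keys (PySem.Str.lower k) with _ | r
    · exact ih best
    · simp [ih]

-- if some item matches the head key, the scan (started with bestRank ≥ 1) returns A's first match
theorem pvScanF_first (key : String) (rest : List String) (items : List (String × String))
    (v : String) :
    ∀ br best, 1 ≤ br → pvInnerA key items = some v →
      pvScanF (key :: rest) br best items = some v := by
  induction items with
  | nil => intro br best _ h; simp [pvInnerA] at h
  | cons p t ih =>
    intro br best hbr h
    obtain ⟨k, w⟩ := p
    simp only [pvInnerA] at h
    simp only [pvScanF, pvF]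
    by_cases he : PySem.Str.lower k = PySem.Str.lower key
    · have hv : w = v := by simpa [he] using h
      subst hv
      rw [if_pos he.symm]
      simp only [if_pos (Nat.lt_of_lt_of_le Nat.zero_lt_one hbr)]
      exact pvScanF_zero _ _ _
    · rw [if_neg (Ne.symm he)]
      simp only [show (PySem.Str.lower k == PySem.Str.lower key) = false from
        beq_eq_false_iff_ne.mpr he, Bool.false_eq_true, if_false] at h
      rcases pvF rest (PySem.Str.lower k) with _ | r
      · exact ih br best hbr h
      · simp only [Option.map_some]
        split_ifs with hlt
        · exact ih (r + 1) (some w) (Nat.succ_le_succ (Nat.zero_le r)) h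
        · exact ih br best hbr h

-- if no item matches the head key, ranks shift by one and the head key drops out
theorem pvScanF_shift (key : String) (rest : List String) (items : List (String × String)) :
    ∀ br best, (∀ p ∈ items, PySem.Str.lower p.1 ≠ PySem.Str.lower key) →
      pvScanF (key :: rest) (br + 1) best items = pvScanF rest br best items := by
  induction items with
  | nil => intro br best _; rfl
  | cons p t ih =>
    intro br best hno
    obtain ⟨k, v⟩ := p
    have hk : PySem.Str.lower k ≠ PySem.Str.lower key := hno (k, v) (List.mem_cons_self ..)
    have ht : ∀ p ∈ t, PySem.Str.lower p.1 ≠ PySem.Str.lower key :=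
      fun p hp => hno p (List.mem_cons_of_mem _ hp)
    simp only [pvScanF, pvF]
    rw [if_neg (Ne.symm hk)]
    rcases pvF rest (PySem.Str.lower k) with _ | r
    · simp only [Option.map_none]
      exact ih br best ht
    · simp only [Option.map_some]
      by_cases hlt : r < br
      · rw [if_pos (by omega : r + 1 < br + 1), if_pos hlt]
        exact ih r (some v) ht
      · rw [if_neg (by omega : ¬ r + 1 < br + 1), if_neg hlt]
        exact ih br best ht

theorem pvInnerA_none (key : String) (items : List (String × String))
    (h : pvInnerA key items = none) :
    ∀ p ∈ items, PySem.Str.lower p.1 ≠ PySem.Str.lower key := by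
  induction items with
  | nil => intro p hp; simp at hp
  | cons q t ih =>
    obtain ⟨k, v⟩ := q
    simp only [pvInnerA] at h
    intro p hp
    rcases List.mem_cons.mp hp with hh | hh
    · intro he
      rw [hh] at he
      simp [he] at h
    · by_cases hk : (PySem.Str.lower k == PySem.Str.lower key) = true
      · simp [hk] at h
      · exact ih (by simpa [hk] using h) p hh

theorem pvMain (keys : List String) (items : List (String × String)) :
    pvOuterA items keys = pvScanF keys keys.length none items := by
  induction keys with
  | nil =>
    induction items with
    | nil => rfl
    | cons p t ih =>
      obtain ⟨k, v⟩ := p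
      simp only [pvOuterA] at *
      simpa [pvScanF, pvF] using ih
  | cons key rest ih =>
    simp only [pvOuterA, List.length_cons]
    rcases h : pvInnerA key items with _ | v
    · rw [pvScanF_shift key rest items rest.length none (pvInnerA_none key items h)]
      exact ih
    · exact (pvScanF_first key rest items v (rest.length + 1) none
        (Nat.succ_le_succ (Nat.zero_le _)) h).symm

-- ===== VERDICT (by name: the statement is the Claim_ definition above) =====
theorem extract_pypi_url_py_spec : Claim_equal_extract_pypi_url_py := by
  intro pu keys _
  unfold Spec_extract_pypi_url_py extract_pypi_url_py extract_pypi_url_py_alt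
  cases pu with
  | none => rfl
  | some items =>
    by_cases h : items = [] <;> simp [h, pvScanB_eq_pvScanF, pvMain]
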